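-- pv_equiv track=rewrite | github.com/na-armin/Gamification_Article | Common/Scirex_process.py | find_index_of_word_in_body
-- ===== SOURCE A (Python) =====
-- def find_index_of_word_in_body(body, _start, _end):
--     sec_index = -1
--     sent_index = -1
--     ind_start = -1
--     ind_end = -1
--     w_count = 0
--     for sec_i, sec in enumerate(body):
--         for sent_i, sent in enumerate(sec):
--             if w_count + len(sent) > _start:
--                 sec_index = sec_i
--                 sent_index = sent_i
--                 ind_start = _start - w_count
--                 ind_end = _end - w_count
--                 break
--             w_count = w_count + len(sent)
--         if sec_index > -1: break
--     return [sec_index, sent_index, ind_start, ind_end]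
-- ===== SOURCE B (Python) =====
-- def find_index_of_word_in_body(body, _start, _end):
--     # Flatten to a table of (sec_i, sent_i, words_before) plus a parallel
--     # prefix-sum list of cumulative ends, then binary-search for the first
--     # sentence whose cumulative end exceeds _start.
--     rows = []   # (sec_i, sent_i, words_before)
--     ends = []   # cumulative word count through each sentence
--     total = 0
--     for sec_i, sec in enumerate(body):
--         for sent_i, sent in enumerate(sec):
--             rows.append((sec_i, sent_i, total))
--             total += len(sent)
--             ends.append(total)
--     lo, hi = 0, len(ends)
--     while lo < hi:
--         mid = (lo + hi) // 2
--         if ends[mid] > _start: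
--             hi = mid
--         else:
--             lo = mid + 1
--     if lo == len(rows):
--         return [-1, -1, -1, -1]
--     sec_i, sent_i, before = rows[lo]
--     return [sec_i, sent_i, _start - before, _end - before]
-- ===== Notes on version B (the rewrite author's own statement) =====
-- stated objective: alternative
-- what changed: A's early-exit nested scan with a running word count is replaced by flattening the body once into a (sec_i, sent_i, words_before) table plus a prefix-sum list of cumulative ends, then binary-searching that prefix-sum list for the first sentence whose cumulative end exceeds _start.
import Mathlib
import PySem

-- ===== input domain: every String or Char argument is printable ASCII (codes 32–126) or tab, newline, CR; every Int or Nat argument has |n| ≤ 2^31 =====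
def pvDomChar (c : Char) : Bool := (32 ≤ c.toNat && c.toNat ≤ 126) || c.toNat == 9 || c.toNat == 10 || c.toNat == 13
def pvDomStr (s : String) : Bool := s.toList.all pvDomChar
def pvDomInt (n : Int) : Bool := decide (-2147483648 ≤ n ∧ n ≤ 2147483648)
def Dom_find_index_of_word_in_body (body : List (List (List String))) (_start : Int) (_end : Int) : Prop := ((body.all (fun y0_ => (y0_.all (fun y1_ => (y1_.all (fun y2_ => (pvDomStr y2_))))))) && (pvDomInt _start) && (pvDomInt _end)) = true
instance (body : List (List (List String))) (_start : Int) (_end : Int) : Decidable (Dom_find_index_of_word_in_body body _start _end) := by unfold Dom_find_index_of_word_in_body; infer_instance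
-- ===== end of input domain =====

-- B replaces A's early-exit nested scan by a flattened (sec,sent,prefix-count) table with a
-- binary search over the prefix-sum ends (objective: alternative; same asymptotic cost).

-- ===== PORT A =====
-- inner sentence loop of A: returns (some (sent_i, w_count at the break), w) on break, else (none, final w_count)
def pvInnerA : List (List String) → Int → Int → Int → (Option (Int × Int)) × Int
  | [], _, _, w => (none, w)
  | s :: rest, start, ti, w =>
    if w + (s.length : Int) > start then (some (ti, w), w)
    else pvInnerA rest start (ti + 1) (w + (s.length : Int))

-- outer section loop of A
def pvOuterA : List (List (List String)) → Int → Int → Int → Int → List Int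
  | [], _, _, _, _ => [-1, -1, -1, -1]
  | sec :: rest, start, end_, si, w =>
    match pvInnerA sec start 0 w with
    | (some (ti, wm), _) => [si, ti, start - wm, end_ - wm]
    | (none, w') => pvOuterA rest start end_ (si + 1) w'

def find_index_of_word_in_body (body : List (List (List String))) (_start : Int) (_end : Int) : List Int :=
  pvOuterA body _start _end 0 0

-- ===== PORT B =====
-- build loop over one section: rows (sec_i, sent_i, words_before), ends (cumulative totals), final total
def pvBuildSent : List (List String) → Int → Int → Int → (List (Int × Int × Int)) × (List Int) × Int
  | [], _, _, total => ([], [], total)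
  | s :: rest, si, ti, total =>
    let r := pvBuildSent rest si (ti + 1) (total + (s.length : Int))
    ((si, ti, total) :: r.1, (total + (s.length : Int)) :: r.2.1, r.2.2)

def pvBuildSecs : List (List (List String)) → Int → Int → (List (Int × Int × Int)) × (List Int) × Int
  | [], _, total => ([], [], total)
  | sec :: rest, si, total =>
    let a := pvBuildSent sec si 0 total
    let b := pvBuildSecs rest (si + 1) a.2.2
    (a.1 ++ b.1, a.2.1 ++ b.2.1, b.2.2)

-- the while-loop binary search of Source B (Python's ends[mid] is always in range there; getD is the total rendering)
def pvBsearch (ends : List Int) (t : Int) (lo hi : Nat) : Nat :=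
  if _h : lo < hi then
    let mid := (lo + hi) / 2
    if ends.getD mid 0 > t then pvBsearch ends t lo mid
    else pvBsearch ends t (mid + 1) hi
  else lo
termination_by hi - lo
decreasing_by all_goals omega

def find_index_of_word_in_body_alt (body : List (List (List String))) (_start : Int) (_end : Int) : List Int :=
  let b := pvBuildSecs body 0 0
  let rows := b.1
  let ends := b.2.1
  let lo := pvBsearch ends _start 0 ends.length
  if lo = rows.length then [-1, -1, -1, -1]
  else
    let r := rows.getD lo (0, 0, 0)
    [r.1, r.2.1, _start - r.2.2, _end - r.2.2]

-- ===== PRECONDITION & SPEC =====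
def Spec_find_index_of_word_in_body (body : List (List (List String))) (_start : Int) (_end : Int) (out : List Int) : Prop := out = find_index_of_word_in_body_alt body _start _end
instance (body : List (List (List String))) (_start : Int) (_end : Int) (out : List Int) : Decidable (Spec_find_index_of_word_in_body body _start _end out) := by unfold Spec_find_index_of_word_in_body; infer_instance

-- ===== CLAIM (what is proved, stated in full; the proofs are below) =====
def Claim_equal_find_index_of_word_in_body : Prop := ∀ (body : List (List (List String))) (_start : Int) (_end : Int), Dom_find_index_of_word_in_body body _start _end → Spec_find_index_of_word_in_body body _start _end (find_index_of_word_in_body body _start _end)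

-- ===== LEMMAS AND PROOFS =====

-- linear reference: index of the first element > t (length if none)
def pvFirstGt : List Int → Int → Nat
  | [], _ => 0
  | e :: es, t => if e > t then 0 else pvFirstGt es t + 1

-- the unique characterisation shared by pvFirstGt and pvBsearch
def pvP (ends : List Int) (t : Int) (r : Nat) : Prop :=
  r ≤ ends.length ∧ (∀ i, i < r → ends.getD i 0 ≤ t) ∧ (r < ends.length → ends.getD r 0 > t)

theorem pvP_unique (ends : List Int) (t : Int) (r₁ r₂ : Nat)
    (h₁ : pvP ends t r₁) (h₂ : pvP ends t r₂) : r₁ = r₂ := by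
  obtain ⟨hl₁, ha₁, hg₁⟩ := h₁
  obtain ⟨hl₂, ha₂, hg₂⟩ := h₂
  by_contra hne
  rcases Nat.lt_or_ge r₁ r₂ with h | h
  · have h1 := hg₁ (lt_of_lt_of_le h hl₂)
    have h2 := ha₂ r₁ h
    omega
  · have hlt : r₂ < r₁ := by omega
    have h1 := hg₂ (lt_of_lt_of_le hlt hl₁)
    have h2 := ha₁ r₂ hlt
    omega

theorem pvFirstGt_P (ends : List Int) (t : Int) : pvP ends t (pvFirstGt ends t) := by
  induction ends with
  | nil => exact ⟨Nat.le_refl _, fun i h => absurd h (Nat.not_lt_zero i), fun h => absurd h (Nat.not_lt_zero 0)⟩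
  | cons e es ih =>
    obtain ⟨hl, ha, hg⟩ := ih
    simp only [pvFirstGt]
    split_ifs with he
    · exact ⟨Nat.zero_le _, fun i h => absurd h (Nat.not_lt_zero i), fun _ => he⟩
    · refine ⟨by simpa using Nat.succ_le_succ hl, ?_, ?_⟩
      · intro i hi
        cases i with
        | zero => simpa using le_of_not_gt he
        | succ j => exact ha j (Nat.lt_of_succ_lt_succ hi)
      · intro h
        exact hg (by simpa using Nat.lt_of_succ_lt_succ h)

-- monotone lists, stated via getD
def pvMono (ends : List Int) : Prop :=
  ∀ i j, i ≤ j → j < ends.length → ends.getD i 0 ≤ ends.getD j 0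

theorem pvBsearch_P (ends : List Int) (t : Int) (hm : pvMono ends) :
    ∀ fuel lo hi, hi - lo ≤ fuel → lo ≤ hi → hi ≤ ends.length →
    (∀ i, i < lo → ends.getD i 0 ≤ t) →
    (∀ i, hi ≤ i → i < ends.length → ends.getD i 0 > t) →
    pvP ends t (pvBsearch ends t lo hi) := by
  intro fuel
  induction fuel with
  | zero =>
    intro lo hi hf hlh hhl hlow hhigh
    have : lo = hi := by omega
    subst this
    rw [pvBsearch]
    simp only [lt_irrefl, dite_false]
    exact ⟨hhl, hlow, fun h => hhigh lo (le_refl _) h⟩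
  | succ n ih =>
    intro lo hi hf hlh hhl hlow hhigh
    rw [pvBsearch]
    by_cases h : lo < hi
    · simp only [h, dite_true]
      set mid := (lo + hi) / 2 with hmid
      have hmlt : mid < hi := by omega
      have hmge : lo ≤ mid := by omega
      have hmlen : mid < ends.length := lt_of_lt_of_le hmlt hhl
      by_cases hc : ends.getD mid 0 > t
      · simp only [hc, if_true]
        refine ih lo mid (by omega) hmge (le_of_lt hmlen) hlow ?_
        intro i hmi hil
        calc t < ends.getD mid 0 := hc
          _ ≤ ends.getD i 0 := hm mid i hmi hil
      · simp only [hc, if_false]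
        refine ih (mid + 1) hi (by omega) (by omega) hhl ?_ hhigh
        intro i hi1
        have hile : i ≤ mid := by omega
        calc ends.getD i 0 ≤ ends.getD mid 0 := hm i mid hile hmlen
          _ ≤ t := le_of_not_gt hc
    · simp only [h, dite_false]
      have : lo = hi := by omega
      subst this
      exact ⟨hhl, hlow, fun hh => hhigh lo (le_refl _) hh⟩

theorem pvBsearch_eq_firstGt (ends : List Int) (t : Int) (hm : pvMono ends) :
    pvBsearch ends t 0 ends.length = pvFirstGt ends t := by
  refine pvP_unique ends t _ _ ?_ (pvFirstGt_P ends t)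
  exact pvBsearch_P ends t hm ends.length 0 ends.length (by omega) (Nat.zero_le _) (le_refl _)
    (fun i h => absurd h (Nat.not_lt_zero i)) (fun i h1 h2 => absurd (lt_of_le_of_lt h1 h2) (lt_irrefl _))

-- bounds of the sentence-level build: every end lies in [total, final total], total ≤ final
theorem pvBuildSent_bounds (sec : List (List String)) (si ti total : Int) :
    total ≤ (pvBuildSent sec si ti total).2.2 ∧
    ∀ e ∈ (pvBuildSent sec si ti total).2.1, total ≤ e ∧ e ≤ (pvBuildSent sec si ti total).2.2 := by
  induction sec generalizing ti total with
  | nil => simp [pvBuildSent]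
  | cons s rest ih =>
    simp only [pvBuildSent, List.mem_cons]
    obtain ⟨h1, h2⟩ := ih (ti + 1) (total + (s.length : Int))
    have hlen : (0 : Int) ≤ (s.length : Int) := Int.natCast_nonneg _
    refine ⟨by omega, ?_⟩
    rintro e (rfl | he)
    · exact ⟨by omega, h1⟩
    · obtain ⟨he1, he2⟩ := h2 e he
      exact ⟨by omega, he2⟩

theorem pvBuildSecs_bounds (body : List (List (List String))) (si total : Int) :
    total ≤ (pvBuildSecs body si total).2.2 ∧
    ∀ e ∈ (pvBuildSecs body si total).2.1, total ≤ e ∧ e ≤ (pvBuildSecs body si total).2.2 := by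
  induction body generalizing si total with
  | nil => simp [pvBuildSecs]
  | cons sec rest ih =>
    simp only [pvBuildSecs, List.mem_append]
    obtain ⟨ha1, ha2⟩ := pvBuildSent_bounds sec si 0 total
    obtain ⟨hb1, hb2⟩ := ih (si + 1) (pvBuildSent sec si 0 total).2.2
    refine ⟨by omega, ?_⟩
    rintro e (he | he)
    · obtain ⟨he1, he2⟩ := ha2 e he
      exact ⟨he1, by omega⟩
    · obtain ⟨he1, he2⟩ := hb2 e he
      exact ⟨by omega, he2⟩

theorem pvBuildSent_pairwise (sec : List (List String)) (si ti total : Int) :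
    (pvBuildSent sec si ti total).2.1.Pairwise (· ≤ ·) := by
  induction sec generalizing ti total with
  | nil => simp [pvBuildSent]
  | cons s rest ih =>
    simp only [pvBuildSent, List.pairwise_cons]
    refine ⟨?_, ih (ti + 1) (total + (s.length : Int))⟩
    intro e he
    exact ((pvBuildSent_bounds rest si (ti + 1) (total + (s.length : Int))).2 e he).1

theorem pvBuildSecs_pairwise (body : List (List (List String))) (si total : Int) :
    (pvBuildSecs body si total).2.1.Pairwise (· ≤ ·) := by
  induction body generalizing si total with
  | nil => simp [pvBuildSecs]
  | cons sec rest ih =>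
    simp only [pvBuildSecs, List.pairwise_append]
    refine ⟨pvBuildSent_pairwise sec si 0 total, ih (si + 1) _, ?_⟩
    intro a ha b hb
    have h1 := ((pvBuildSent_bounds sec si 0 total).2 a ha).2
    have h2 := ((pvBuildSecs_bounds rest (si + 1) (pvBuildSent sec si 0 total).2.2).2 b hb).1
    omega

theorem pairwise_mono (ends : List Int) (h : ends.Pairwise (· ≤ ·)) : pvMono ends := by
  intro i j hij hj
  rcases Nat.eq_or_lt_of_le hij with rfl | hlt
  · exact le_refl _
  · have hi : i < ends.length := lt_trans hlt hj
    have hg := List.pairwise_iff_getElem.mp h i j hi hj hlt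
    simpa [List.getD_eq_getElem?_getD, List.getElem?_eq_getElem hi, List.getElem?_eq_getElem hj] using hg

-- lengths agree across the built table
theorem pvBuildSent_len (sec : List (List String)) (si ti total : Int) :
    (pvBuildSent sec si ti total).1.length = sec.length ∧
    (pvBuildSent sec si ti total).2.1.length = sec.length := by
  induction sec generalizing ti total with
  | nil => simp [pvBuildSent]
  | cons s rest ih =>
    obtain ⟨h1, h2⟩ := ih (ti + 1) (total + (s.length : Int))
    simp [pvBuildSent, h1, h2]

theorem pvBuildSecs_len (body : List (List (List String))) (si total : Int) :
    (pvBuildSecs body si total).1.length = (pvBuildSecs body si total).2.1.length := by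
  induction body generalizing si total with
  | nil => simp [pvBuildSecs]
  | cons sec rest ih =>
    obtain ⟨h1, h2⟩ := pvBuildSent_len sec si 0 total
    simp [pvBuildSecs, h1, h2, ih]

-- every row built for a section carries that section's index
theorem pvBuildSent_fst (sec : List (List String)) (si ti total : Int) :
    ∀ r ∈ (pvBuildSent sec si ti total).1, r.1 = si := by
  induction sec generalizing ti total with
  | nil => simp [pvBuildSent]
  | cons s rest ih =>
    simp only [pvBuildSent, List.mem_cons]
    rintro r (rfl | hr)
    · rfl
    · exact ih (ti + 1) (total + (s.length : Int)) r hr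

theorem pvFirstGt_le (l : List Int) (t : Int) : pvFirstGt l t ≤ l.length := by
  induction l with
  | nil => simp [pvFirstGt]
  | cons e es ih =>
    simp only [pvFirstGt, List.length_cons]
    split_ifs <;> omega

theorem pvFirstGt_append (l₁ l₂ : List Int) (t : Int) :
    pvFirstGt (l₁ ++ l₂) t =
      if pvFirstGt l₁ t < l₁.length then pvFirstGt l₁ t else l₁.length + pvFirstGt l₂ t := by
  induction l₁ with
  | nil => simp [pvFirstGt]
  | cons e es ih =>
    by_cases he : e > t
    · simp [pvFirstGt, he]
    · simp only [List.cons_append, pvFirstGt, if_neg he, ih, List.length_cons]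
      split_ifs <;> omega

-- A's inner loop against the section build: if some end exceeds start, A breaks at the
-- row pvFirstGt picks; otherwise it falls through with the final total.
theorem inner_eq (start : Int) (sec : List (List String)) (si ti w : Int) :
    (pvFirstGt (pvBuildSent sec si ti w).2.1 start < sec.length →
      pvInnerA sec start ti w =
        (some (((pvBuildSent sec si ti w).1.getD (pvFirstGt (pvBuildSent sec si ti w).2.1 start) (0,0,0)).2.1,
               ((pvBuildSent sec si ti w).1.getD (pvFirstGt (pvBuildSent sec si ti w).2.1 start) (0,0,0)).2.2),
         ((pvBuildSent sec si ti w).1.getD (pvFirstGt (pvBuildSent sec si ti w).2.1 start) (0,0,0)).2.2)) ∧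
    (¬ pvFirstGt (pvBuildSent sec si ti w).2.1 start < sec.length →
      pvInnerA sec start ti w = (none, (pvBuildSent sec si ti w).2.2)) := by
  induction sec generalizing ti w with
  | nil => simp [pvInnerA, pvBuildSent, pvFirstGt]
  | cons s rest ih =>
    obtain ⟨ih1, ih2⟩ := ih (ti + 1) (w + (s.length : Int))
    by_cases hc : w + (s.length : Int) > start
    · constructor
      · intro _
        simp [pvInnerA, pvBuildSent, pvFirstGt, hc]
      · intro h
        exfalso
        apply h
        simp [pvBuildSent, pvFirstGt, hc]
    · have hfg : pvFirstGt (pvBuildSent (s :: rest) si ti w).2.1 start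
          = pvFirstGt (pvBuildSent rest si (ti + 1) (w + (s.length : Int))).2.1 start + 1 := by
        simp [pvBuildSent, pvFirstGt, hc]
      constructor
      · intro h
        have h' : pvFirstGt (pvBuildSent rest si (ti + 1) (w + (s.length : Int))).2.1 start < rest.length := by
          rw [hfg] at h
          simpa using Nat.lt_of_succ_lt_succ h
        have heq := ih1 h'
        simp only [pvInnerA, if_neg hc, hfg]
        simp only [pvBuildSent, List.getD_cons_succ]
        exact heq
      · intro h
        have h' : ¬ pvFirstGt (pvBuildSent rest si (ti + 1) (w + (s.length : Int))).2.1 start < rest.length := by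
          rw [hfg] at h
          simp only [List.length_cons] at h
          omega
        have heq := ih2 h'
        simp only [pvInnerA, if_neg hc]
        simpa [pvBuildSent] using heq

-- A's outer loop equals selection by pvFirstGt from the flattened table
theorem outer_eq (start end_ : Int) (body : List (List (List String))) (si w : Int) :
    pvOuterA body start end_ si w =
      (let rows := (pvBuildSecs body si w).1
       let ends := (pvBuildSecs body si w).2.1
       let k := pvFirstGt ends start
       if k = rows.length then [-1, -1, -1, -1]
       else
         let r := rows.getD k (0, 0, 0)
         [r.1, r.2.1, start - r.2.2, end_ - r.2.2]) := by
  induction body generalizing si w with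
  | nil => simp [pvOuterA, pvBuildSecs, pvFirstGt]
  | cons sec rest ih =>
    obtain ⟨h1, h2⟩ := inner_eq start sec si 0 w
    obtain ⟨hrl, hel⟩ := pvBuildSent_len sec si 0 w
    have hrecl := pvBuildSecs_len rest (si + 1) (pvBuildSent sec si 0 w).2.2
    simp only [pvOuterA, pvBuildSecs, pvFirstGt_append, hel, List.length_append, hrl]
    by_cases hk : pvFirstGt (pvBuildSent sec si 0 w).2.1 start < sec.length
    · rw [h1 hk]
      have hget : ((pvBuildSent sec si 0 w).1 ++ (pvBuildSecs rest (si + 1) (pvBuildSent sec si 0 w).2.2).1).getD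
            (pvFirstGt (pvBuildSent sec si 0 w).2.1 start) (0, 0, 0)
          = (pvBuildSent sec si 0 w).1.getD (pvFirstGt (pvBuildSent sec si 0 w).2.1 start) (0, 0, 0) := by
        rw [List.getD_eq_getElem?_getD, List.getD_eq_getElem?_getD,
          List.getElem?_append_left (by omega)]
      have hfst : ((pvBuildSent sec si 0 w).1.getD (pvFirstGt (pvBuildSent sec si 0 w).2.1 start) (0, 0, 0)).1 = si := by
        have hin : (pvBuildSent sec si 0 w).1.getD (pvFirstGt (pvBuildSent sec si 0 w).2.1 start) (0, 0, 0)
            ∈ (pvBuildSent sec si 0 w).1 := by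
          rw [List.getD_eq_getElem?_getD, List.getElem?_eq_getElem (by omega)]
          exact List.getElem_mem _
        exact pvBuildSent_fst sec si 0 w _ hin
      have hkl := pvFirstGt_le (pvBuildSecs rest (si + 1) (pvBuildSent sec si 0 w).2.2).2.1 start
      simp only [if_pos hk]
      simp only [if_neg (by omega : ¬ pvFirstGt (pvBuildSent sec si 0 w).2.1 start
        = sec.length + (pvBuildSecs rest (si + 1) (pvBuildSent sec si 0 w).2.2).1.length)]
      rw [hget, hfst]
    · rw [h2 hk]
      dsimp only
      rw [ih (si + 1) (pvBuildSent sec si 0 w).2.2]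
      simp only [if_neg hk]
      have hge : pvFirstGt (pvBuildSent sec si 0 w).2.1 start = sec.length := by
        have := pvFirstGt_le (pvBuildSent sec si 0 w).2.1 start
        omega
      by_cases hk2 : pvFirstGt (pvBuildSecs rest (si + 1) (pvBuildSent sec si 0 w).2.2).2.1 start
          = (pvBuildSecs rest (si + 1) (pvBuildSent sec si 0 w).2.2).1.length
      · simp [hk2, hrecl]
      · have hlt : pvFirstGt (pvBuildSecs rest (si + 1) (pvBuildSent sec si 0 w).2.2).2.1 start
            < (pvBuildSecs rest (si + 1) (pvBuildSent sec si 0 w).2.2).1.length := by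
          have := pvFirstGt_le (pvBuildSecs rest (si + 1) (pvBuildSent sec si 0 w).2.2).2.1 start
          omega
        simp only [if_neg hk2, if_neg (by omega : ¬ sec.length
            + pvFirstGt (pvBuildSecs rest (si + 1) (pvBuildSent sec si 0 w).2.2).2.1 start
            = sec.length + (pvBuildSecs rest (si + 1) (pvBuildSent sec si 0 w).2.2).1.length)]
        simp only [List.getD_eq_getElem?_getD]
        rw [List.getElem?_append_right (by omega), hrl, Nat.add_sub_cancel_left]

-- ===== VERDICT (by name: the statement is the Claim_ definition above) =====
theorem find_index_of_word_in_body_spec : Claim_equal_find_index_of_word_in_body := by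
  intro body s e _
  unfold Spec_find_index_of_word_in_body find_index_of_word_in_body find_index_of_word_in_body_alt
  simp only [outer_eq, pvBsearch_eq_firstGt _ _ (pairwise_mono _ (pvBuildSecs_pairwise body 0 0)),
    pvBuildSecs_len]
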